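-- pv_equiv track=rewrite | github.com/mmakaay/adventofcode2025 | 06_Trash_Compactor/part2.py | process_worksheet
-- ===== SOURCE A (Python) =====
-- from operator import mul, add
--
-- def process_worksheet(worksheet):
--     rotated_worksheet = zip(*worksheet)
--
--     for *digits, operator in rotated_worksheet:
--         operation = mul if operator == '*' else add
--         result = join_to_int(digits)
--
--         for *digits, _ in rotated_worksheet:
--             if at_end_of_problem(digits):
--                 yield result
--                 break
--             result = operation(result, join_to_int(digits))
--
-- def join_to_int(digits):
--     return int("".join(digits))
--
-- def at_end_of_problem(digits):
--     return ''.join(digits).strip() == ""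
-- ===== SOURCE B (Python) =====
-- from operator import mul, add
-- from functools import reduce
--
-- def process_worksheet(worksheet):
--     # Phase 1: transpose explicitly, then partition the columns into
--     # problem groups, a blank column (ignoring its last char) acting as a
--     # separator only when a group is already open; an unterminated trailing
--     # group is dropped, exactly as in the original.
--     columns = list(zip(*worksheet))
--     groups, current = [], []
--     for column in columns:
--         if current and ''.join(column[:-1]).strip() == '':
--             groups.append(current)
--             current = []
--         else:
--             current.append(column)
--     # Phase 2: evaluate each group with one reduce.
--     for group in groups:
--         operation = mul if group[0][-1] == '*' else add
--         yield reduce(operation, (int(''.join(c[:-1])) for c in group))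
-- ===== Notes on version B (the rewrite author's own statement) =====
-- stated objective: alternative
-- what changed: A interleaves two nested for-loops over one shared lazy zip iterator, updating a running accumulator as it goes; B first materialises the transposed columns, partitions them into problem groups in a single pass (a blank column closes an open group, an unterminated trailing group is dropped), and then evaluates each group with one functools.reduce.
import Mathlib
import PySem

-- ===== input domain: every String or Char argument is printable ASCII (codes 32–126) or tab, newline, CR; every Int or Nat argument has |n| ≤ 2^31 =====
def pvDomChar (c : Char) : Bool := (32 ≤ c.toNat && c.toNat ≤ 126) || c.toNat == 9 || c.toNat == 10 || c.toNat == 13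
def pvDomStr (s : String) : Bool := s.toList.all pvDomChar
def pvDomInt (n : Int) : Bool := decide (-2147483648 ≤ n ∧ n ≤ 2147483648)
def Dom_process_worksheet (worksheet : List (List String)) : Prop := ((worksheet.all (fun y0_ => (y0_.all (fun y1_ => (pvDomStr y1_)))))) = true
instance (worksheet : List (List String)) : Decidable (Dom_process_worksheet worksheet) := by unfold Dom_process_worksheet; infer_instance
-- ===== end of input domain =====

-- B replaces A's nested loops over a shared lazy column iterator by an explicit
-- transpose, a single partition of the columns into problem groups, and one
-- reduce per group (objective: alternative decomposition, same cost).
-- A is a generator; equivalence is about the list of yielded values.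

-- ===== PORT A =====

-- zip(*worksheet): columns up to the shortest row (shared by both ports, as both
-- Pythons start from the same zip(*worksheet) expression)
def pyTranspose (rows : List (List String)) : List (List String) :=
  match (rows.map List.length).min? with
  | none => []
  | some n => (List.range n).map (fun i => rows.map (fun r => r.getD i ""))

-- int("".join(digits)); the ValueError case (none) is excluded by Pre_, getD 0 is a dummy there
def join_to_int (digits : List String) : Int :=
  (PySem.Int.ofStr? (PySem.Str.join "" digits)).getD 0

def at_end_of_problem (digits : List String) : Bool :=
  PySem.Str.strip (PySem.Str.join "" digits) == ""

mutual
-- the outer 'for *digits, operator in rotated_worksheet' loop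
def pwOuter : List (List String) → List Int
  | [] => []
  | col :: rest =>
    let operation : Int → Int → Int := if col.getLast? == some "*" then (· * ·) else (· + ·)
    pwInner operation (join_to_int col.dropLast) rest
-- the inner 'for *digits, _ in rotated_worksheet' loop over the SAME iterator
def pwInner (operation : Int → Int → Int) (result : Int) : List (List String) → List Int
  | [] => []
  | col :: rest =>
    if at_end_of_problem col.dropLast then result :: pwOuter rest
    else pwInner operation (operation result (join_to_int col.dropLast)) rest
end

def process_worksheet (worksheet : List (List String)) : List Int :=
  pwOuter (pyTranspose worksheet)

-- ===== PORT B =====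

def altJoinDigits (col : List String) : String := PySem.Str.join "" col.dropLast

def altIsSep (col : List String) : Bool := PySem.Str.strip (altJoinDigits col) == ""

def altParse (col : List String) : Int := (PySem.Int.ofStr? (altJoinDigits col)).getD 0

-- phase 1 step: a blank column flushes an open group, otherwise the column joins it
def altStep (st : List (List (List String)) × List (List String)) (col : List String) :
    List (List (List String)) × List (List String) :=
  let (groups, current) := st
  if !current.isEmpty && altIsSep col then (groups ++ [current], [])
  else (groups, current ++ [col])

-- phase 2: reduce(operation, ints of the group); [] is unreachable (groups flush non-empty)
def altEval (group : List (List String)) : Int :=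
  match group with
  | [] => 0
  | g0 :: gs =>
    let operation : Int → Int → Int := if g0.getLast? == some "*" then (· * ·) else (· + ·)
    gs.foldl (fun r c => operation r (altParse c)) (altParse g0)

def process_worksheet_alt (worksheet : List (List String)) : List Int :=
  (((pyTranspose worksheet).foldl altStep ([], [])).1).map altEval

-- ===== PRECONDITION & SPEC =====
-- Pre_ is exactly the set of inputs on which Python A returns (no ValueError):
-- every column (without its last entry) is blank or a valid int literal, the first
-- column is not blank, and no two consecutive columns are blank.
def Pre_process_worksheet (worksheet : List (List String)) : Prop :=
  (∀ c ∈ pyTranspose worksheet,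
      at_end_of_problem c.dropLast = true ∨
      (PySem.Int.ofStr? (PySem.Str.join "" c.dropLast)).isSome = true) ∧
  (∀ c ∈ (pyTranspose worksheet).take 1, at_end_of_problem c.dropLast = false) ∧
  (∀ p ∈ (pyTranspose worksheet).zip (pyTranspose worksheet).tail,
      ¬(at_end_of_problem p.1.dropLast = true ∧ at_end_of_problem p.2.dropLast = true))
instance (worksheet : List (List String)) : Decidable (Pre_process_worksheet worksheet) := by
  unfold Pre_process_worksheet; infer_instance

def pvWitness_process_worksheet : List (List String) :=
  [["1", " ", "2"], ["3", " ", "4"], ["+", " ", "*"]]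

def Spec_process_worksheet (worksheet : List (List String)) (out : List Int) : Prop := out = process_worksheet_alt worksheet
instance (worksheet : List (List String)) (out : List Int) : Decidable (Spec_process_worksheet worksheet out) := by unfold Spec_process_worksheet; infer_instance

-- ===== CLAIM (what is proved, stated in full; the proofs are below) =====
def Claim_equal_process_worksheet : Prop := ∀ (worksheet : List (List String)), Dom_process_worksheet worksheet → Pre_process_worksheet worksheet → Spec_process_worksheet worksheet (process_worksheet worksheet)

-- ===== LEMMAS AND PROOFS =====

-- B's separator/parse tests coincide with A's helpers applied to col.dropLast
theorem altIsSep_eq (col : List String) : altIsSep col = at_end_of_problem col.dropLast := rfl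

theorem altParse_eq (col : List String) : altParse col = join_to_int col.dropLast := rfl

-- appending one column to an open group folds one more operation step
theorem altEval_concat (g0 : List String) (gs : List (List String)) (c : List String) :
    altEval (g0 :: (gs ++ [c]))
      = (if g0.getLast? == some "*" then (· * ·) else (· + ·))
          (altEval (g0 :: gs)) (altParse c) := by
  simp [altEval, List.foldl_append]

-- loop invariant: B's fold, started with pending groups `acc` and open group `cur`,
-- yields `acc`'s values followed by what A's loops produce from the remaining columns
theorem altFold_key (cols : List (List String)) :
    ∀ (acc : List (List (List String))) (cur : List (List String)),
    ((cols.foldl altStep (acc, cur)).1).map altEval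
      = acc.map altEval ++
        (match cur with
         | [] => pwOuter cols
         | g0 :: gs =>
             pwInner (if g0.getLast? == some "*" then (· * ·) else (· + ·))
               (altEval (g0 :: gs)) cols) := by
  induction cols with
  | nil =>
    intro acc cur
    cases cur <;> simp [pwOuter, pwInner]
  | cons col rest ih =>
    intro acc cur
    cases cur with
    | nil =>
      have hstep : altStep (acc, []) col = (acc, [col]) := by simp [altStep]
      rw [List.foldl_cons, hstep, ih]
      simp [pwOuter, altEval, altParse_eq]
    | cons g0 gs =>
      by_cases hsep : altIsSep col = true
      · have hstep : altStep (acc, g0 :: gs) col = (acc ++ [g0 :: gs], []) := by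
          simp [altStep, hsep]
        rw [List.foldl_cons, hstep, ih]
        have hend : at_end_of_problem col.dropLast = true := by rw [← altIsSep_eq]; exact hsep
        simp [pwInner, hend]
      · have hsep' : altIsSep col = false := by simpa using hsep
        have hstep : altStep (acc, g0 :: gs) col = (acc, g0 :: (gs ++ [col])) := by
          simp [altStep, hsep']
        rw [List.foldl_cons, hstep, ih]
        have hend : at_end_of_problem col.dropLast = false := by rw [← altIsSep_eq]; exact hsep'
        simp [pwInner, hend, altEval_concat, altParse_eq]

-- ===== VERDICT (by name: the statement is the Claim_ definition above) =====
theorem process_worksheet_spec : Claim_equal_process_worksheet := by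
  intro worksheet _hdom _hpre
  show process_worksheet worksheet = process_worksheet_alt worksheet
  unfold process_worksheet process_worksheet_alt
  rw [altFold_key (pyTranspose worksheet) [] []]
  simp
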